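-- pv_equiv track=rewrite | github.com/celpegor216/ps | 프로그래머스/lv3/12987. 숫자 게임/숫자 게임.py | solution
-- ===== SOURCE A (Python) =====
-- import heapq
--
-- def solution(A, B):
--     answer = 0
--
--     a = []
--     b = []
--
--     for item in A:
--         heapq.heappush(a, -item)
--     for item in B:
--         heapq.heappush(b, -item)
--
--     while a:
--         temp_a, temp_b = heapq.heappop(a), heapq.heappop(b)
--
--         if temp_a > temp_b:
--             answer += 1
--         else:
--             heapq.heappush(b, temp_b)
--
--     return answer
-- ===== SOURCE B (Python) =====
-- def solution(A, B):
--     # Dual greedy from the weak end: walk B's cards in ascending order; each card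
--     # either beats the smallest still-unbeaten A card (scores, and that A card is
--     # consumed -- the answer doubles as the pointer into sorted A) or is discarded
--     # as too weak.  Correct by the standard exchange argument: a winning card never
--     # does better than beating the smallest card it can beat.
--     a_asc = sorted(A)
--     answer = 0
--     for card in sorted(B):
--         if answer < len(a_asc) and card > a_asc[answer]:
--             answer += 1
--     return answer
-- ===== Notes on version B (the rewrite author's own statement) =====
-- stated objective: simpler
-- what changed: Replaces A's top-down greedy (pop the max of both heaps, re-push B's card when it loses, consuming A's cards from the strongest down) with the dual bottom-up greedy: a single ascending pass over sorted B whose running answer doubles as the pointer to the smallest still-unbeaten card of sorted A, discarding too-weak B cards (equal by an exchange argument, proved via the snoc lemmas in the Lean file); removes all per-element heap push/pop traffic.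
import Mathlib
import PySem

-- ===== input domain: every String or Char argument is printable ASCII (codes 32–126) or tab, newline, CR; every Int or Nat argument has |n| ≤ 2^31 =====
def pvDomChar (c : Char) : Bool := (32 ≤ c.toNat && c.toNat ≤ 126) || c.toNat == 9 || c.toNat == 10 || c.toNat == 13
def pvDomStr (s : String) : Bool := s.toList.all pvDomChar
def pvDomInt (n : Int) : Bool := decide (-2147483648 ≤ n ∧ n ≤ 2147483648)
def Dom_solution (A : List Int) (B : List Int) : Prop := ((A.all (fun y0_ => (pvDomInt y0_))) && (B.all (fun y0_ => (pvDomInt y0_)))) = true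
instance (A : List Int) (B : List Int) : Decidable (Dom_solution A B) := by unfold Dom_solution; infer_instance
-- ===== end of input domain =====

-- B replaces A's top-down heap greedy (pop both maxes, re-push losing B cards) by the
-- dual bottom-up greedy: one ascending pass over sorted B whose answer doubles as the
-- pointer to the smallest unbeaten card of sorted A; simpler, same return values.

-- ===== PORT A =====
-- heapq has no PySem primitive; the Int min-heap is modelled by its sorted contents:
-- heappush = ordered insert, heappop = take the head.  This model is extensionally
-- exact here: heappop returns the heap's minimum, and equal Ints are indistinguishable.
def hpush (h : List Int) (x : Int) : List Int :=
  PySem.List.insertBy (fun a b => decide (a < b)) x h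

-- the `while a:` loop; `none` = heappop from the empty heap b (IndexError), excluded by Pre_
def solLoop : List Int → List Int → Int → Option Int
  | [], _, answer => some answer
  | _ :: _, [], _ => none
  | tempA :: restA, tempB :: restB, answer =>
      if tempA > tempB then solLoop restA restB (answer + 1)
      else solLoop restA (hpush restB tempB) answer

def solution (A : List Int) (B : List Int) : Int :=
  let a := A.foldl (fun h item => hpush h (-item)) []
  let b := B.foldl (fun h item => hpush h (-item)) []
  (solLoop a b 0).getD 0

-- ===== PORT B =====
-- the `for card in sorted(B):` loop; the guard `answer < len(a_asc)` makes the index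
-- `a_asc[answer]` always in range (answer starts at 0 and only increments), so a_asc[answer]
-- is ported as (pyGet? …).getD 0 — the default is never taken under the guard.
def solution_alt (A : List Int) (B : List Int) : Int :=
  let aAsc := PySem.List.sorted A (fun x => x) false
  (PySem.List.sorted B (fun x => x) false).foldl
    (fun answer card =>
      if answer < (aAsc.length : Int) ∧ (PySem.List.pyGet? aAsc answer).getD 0 < card
      then answer + 1 else answer) 0

-- ===== PRECONDITION & SPEC =====
-- Pre_ excludes exactly the inputs on which A raises IndexError (heappop from the
-- emptied heap b): those where B's whole hand beats distinct cards among all of A but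
-- its single weakest, so b is exhausted while the loop over a still runs.
def Pre_solution (A : List Int) (B : List Int) : Prop :=
  A = [] ∨ A.length ≤ B.length ∨
    ((List.zip (PySem.List.sorted B (fun x => x) false)
               ((PySem.List.sorted A (fun x => x) false).drop 1)).any
       (fun p => p.1 ≤ p.2)) = true
instance (A : List Int) (B : List Int) : Decidable (Pre_solution A B) := by
  unfold Pre_solution; infer_instance

def pvWitness_solution : List Int × List Int := ([3, 1, 5, 7], [2, 2, 6, 8])

def Spec_solution (A : List Int) (B : List Int) (out : Int) : Prop := out = solution_alt A B
instance (A : List Int) (B : List Int) (out : Int) : Decidable (Spec_solution A B out) := by unfold Spec_solution; infer_instance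

-- ===== CLAIM (what is proved, stated in full; the proofs are below) =====
def Claim_equal_solution : Prop := ∀ (A : List Int) (B : List Int), Dom_solution A B → Pre_solution A B → Spec_solution A B (solution A B)

-- ===== LEMMAS AND PROOFS =====

-- B's loop body as a named reference count: scanning b (ascending), each card either
-- beats the head of the remaining (ascending) a and consumes it, or is discarded.
def dualG : List Int → List Int → Int
  | _, [] => 0
  | [], _ :: _ => 0
  | x :: xs, c :: cs => if x < c then 1 + dualG xs cs else dualG (x :: xs) cs
termination_by a b => b.length

lemma dualG_nil_left (b : List Int) : dualG [] b = 0 := by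
  cases b <;> simp [dualG]

lemma dualG_nil_right (a : List Int) : dualG a [] = 0 := by
  cases a <;> simp [dualG]

-- A's heap loop, read off the two descending hands (bridge between the ports)
def mergeRun : List Int → List Int → Int → Option Int
  | [], _, answer => some answer
  | _ :: _, [], _ => none
  | a :: as, b :: bs, answer =>
      if b > a then mergeRun as bs (answer + 1)
      else mergeRun as (b :: bs) answer

-- ---- Port A = mergeRun on the descending sorts --------------------------------

-- re-inserting a lower bound of a sorted list puts it back at the front
lemma insertBy_min (y : Int) (ys : List Int)
    (hmin : ∀ z ∈ ys, y ≤ z) :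
    PySem.List.insertBy (fun a b => decide (a < b)) y ys = y :: ys := by
  induction ys with
  | nil => rfl
  | cons z t ih =>
      by_cases hz : y < z
      · simp [PySem.List.insertBy, hz]
      · have hy : y = z := le_antisymm (hmin z (by simp)) (not_lt.mp hz)
        subst hy
        have h1 : PySem.List.insertBy (fun a b => decide (a < b)) y (y :: t)
            = y :: PySem.List.insertBy (fun a b => decide (a < b)) y t := by
          simp [PySem.List.insertBy]
        rw [h1, ih (fun w hw => hmin w (by simp [hw]))]

-- A's heap build is an insertion sort of the negated hand
lemma build_eq_sorted (L : List Int) :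
    L.foldl (fun h item => hpush h (-item)) []
      = PySem.List.sorted (L.map (fun t => -t)) (fun x => x) false := by
  rw [PySem.List.sorted_eq_foldl_insertBy, List.foldl_map]
  rfl

lemma solLoop_eq_mergeRun (x : List Int) : ∀ (y : List Int) (ans : Int),
    y.Pairwise (· ≤ ·) →
    solLoop x y ans = mergeRun (x.map (fun t => -t)) (y.map (fun t => -t)) ans := by
  induction x with
  | nil => intro y ans _; cases y <;> rfl
  | cons xa xs ih =>
      intro y ans hy
      cases y with
      | nil => rfl
      | cons y0 ys =>
          have hy0 : ∀ z ∈ ys, y0 ≤ z := (List.pairwise_cons.mp hy).1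
          have hys : ys.Pairwise (· ≤ ·) := (List.pairwise_cons.mp hy).2
          by_cases hc : xa > y0
          · have hc' : -y0 > -xa := by omega
            simp only [solLoop, mergeRun, List.map, if_pos hc, if_pos hc']
            exact ih ys (ans + 1) hys
          · have hc' : ¬(-y0 > -xa) := by omega
            simp only [solLoop, mergeRun, List.map, if_neg hc, if_neg hc']
            rw [hpush, insertBy_min y0 ys hy0]
            exact ih (y0 :: ys) ans hy

-- the heap A builds, read ascending and negated back, is exactly the descending sort
lemma negmap_build_eq_sortedDesc (L : List Int) :
    ((L.foldl (fun h item => hpush h (-item)) []).map (fun t => -t))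
      = PySem.List.sorted L (fun x => x) true := by
  rw [build_eq_sorted]
  apply List.eq_of_perm_of_sorted (le := fun a b : Int => b ≤ a)
    (fun a b _ _ h1 h2 => le_antisymm h2 h1)
  · rw [List.pairwise_map]
    exact (PySem.List.sorted_pairwise (L.map (fun t => -t)) (fun x => x)).imp
      (fun hab => by simpa using hab)
  · exact PySem.List.sorted_pairwise_rev L (fun x => x)
  · have h1 : ((PySem.List.sorted (L.map (fun t => -t)) (fun x => x) false).map
        (fun t => -t)).Perm L := by
      have h2 := (PySem.List.sorted_perm (L.map (fun t => -t)) (fun x => x) false).map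
        (fun t : Int => -t)
      simpa using h2
    exact h1.trans (PySem.List.sorted_perm L (fun x => x) true).symm

lemma solution_eq_mergeRun (A B : List Int) :
    solution A B = (mergeRun (PySem.List.sorted A (fun x => x) true)
                             (PySem.List.sorted B (fun x => x) true) 0).getD 0 := by
  show (solLoop (A.foldl (fun h item => hpush h (-item)) [])
        (B.foldl (fun h item => hpush h (-item)) []) 0).getD 0 = _
  have hbP : (B.foldl (fun h item => hpush h (-item)) []).Pairwise (· ≤ ·) := by
    rw [build_eq_sorted]
    exact PySem.List.sorted_pairwise (B.map (fun t => -t)) (fun x => x)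
  rw [solLoop_eq_mergeRun _ _ 0 hbP, negmap_build_eq_sortedDesc A,
      negmap_build_eq_sortedDesc B]

-- ---- Port B = dualG on the ascending sorts ------------------------------------

lemma foldl_eq_dualG (aAsc : List Int) : ∀ (b : List Int) (k : Nat), k ≤ aAsc.length →
    b.foldl (fun answer card =>
        if answer < (aAsc.length : Int) ∧ (PySem.List.pyGet? aAsc answer).getD 0 < card
        then answer + 1 else answer) (k : Int)
      = (k : Int) + dualG (aAsc.drop k) b := by
  intro b
  induction b with
  | nil => intro k hk; rw [List.foldl_nil, dualG_nil_right, add_zero]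
  | cons c cs ih =>
      intro k hk
      by_cases hlt : k < aAsc.length
      · have hget : PySem.List.pyGet? aAsc ((k : Nat) : Int) = some aAsc[k] := by
          simp [PySem.List.pyGet?_natCast, List.getElem?_eq_getElem hlt]
        have hdrop : aAsc.drop k = aAsc[k] :: aAsc.drop (k + 1) :=
          (List.getElem_cons_drop hlt).symm
        by_cases hbeat : aAsc[k] < c
        · have hcond : (((k : Nat) : Int) < (aAsc.length : Int) ∧
              (PySem.List.pyGet? aAsc ((k : Nat) : Int)).getD 0 < c) :=
            ⟨by exact_mod_cast hlt, by rw [hget]; simpa using hbeat⟩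
          have hcast : ((k : Nat) : Int) + 1 = ((k + 1 : Nat) : Int) := by push_cast; ring
          rw [List.foldl_cons, if_pos hcond, hcast, ih (k + 1) (by omega), hdrop]
          simp only [dualG, if_pos hbeat]
          push_cast; ring
        · have hcond : ¬ (((k : Nat) : Int) < (aAsc.length : Int) ∧
              (PySem.List.pyGet? aAsc ((k : Nat) : Int)).getD 0 < c) := by
            rw [hget]; intro h; exact hbeat (by simpa using h.2)
          rw [List.foldl_cons, if_neg hcond, ih k hk, hdrop]
          simp only [dualG, if_neg hbeat]
      · have hk' : k = aAsc.length := by omega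
        have hcond : ¬ (((k : Nat) : Int) < (aAsc.length : Int) ∧
            (PySem.List.pyGet? aAsc ((k : Nat) : Int)).getD 0 < c) := by
          intro h; have := h.1; omega
        rw [List.foldl_cons, if_neg hcond, ih k hk, hk', List.drop_length,
            dualG_nil_left, dualG_nil_left]
      -- hk : k ≤ length, hlt false gives k = length; dualG [] _ = 0 on both sides

lemma solution_alt_eq_dualG (A B : List Int) :
    solution_alt A B = dualG (PySem.List.sorted A (fun x => x) false)
                             (PySem.List.sorted B (fun x => x) false) := by
  have h := foldl_eq_dualG (PySem.List.sorted A (fun x => x) false)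
      (PySem.List.sorted B (fun x => x) false) 0 (Nat.zero_le _)
  simpa [solution_alt] using h

-- ---- Exchange lemmas: appending the current pair of maxes to dualG's inputs ----

-- a single weakest-beats-everything card always scores exactly once
lemma dualG_single (a0 b0 : Int) (h : a0 < b0) :
    ∀ l : List Int, dualG [a0] (l ++ [b0]) = 1 := by
  intro l
  induction l with
  | nil => simp [dualG, h, dualG_nil_right]
  | cons c cs ih =>
      by_cases hc : a0 < c
      · simp [dualG, hc, dualG_nil_left]
      · simpa [dualG, hc] using ih

-- a new strongest pair with b0 > a0 adds exactly one win
lemma dualG_snoc_win : ∀ (b a : List Int) (a0 b0 : Int),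
    (∀ z ∈ a, z ≤ a0) → (∀ z ∈ b, z ≤ b0) → a0 < b0 →
    dualG (a ++ [a0]) (b ++ [b0]) = dualG a b + 1 := by
  intro b
  induction b with
  | nil =>
      intro a a0 b0 ha _ h
      cases a with
      | nil => simp [dualG, h, dualG_nil_right]
      | cons x xs =>
          have hx : x < b0 := lt_of_le_of_lt (ha x (by simp)) h
          simp [dualG, hx, dualG_nil_right]
  | cons c cs ih =>
      intro a a0 b0 ha hb h
      cases a with
      | nil =>
          rw [dualG_nil_left, List.nil_append]
          exact dualG_single a0 b0 h (c :: cs)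
      | cons x xs =>
          by_cases hc : x < c
          · have := ih xs a0 b0 (fun z hz => ha z (by simp [hz]))
              (fun z hz => hb z (by simp [hz])) h
            simp only [List.cons_append, dualG, if_pos hc, this]
            ring
          · have := ih (x :: xs) a0 b0 ha (fun z hz => hb z (by simp [hz])) h
            simp only [List.cons_append, dualG, if_neg hc] at this ⊢
            exact this

-- a new strongest A card that no B card beats changes nothing
lemma dualG_snoc_skip : ∀ (b a : List Int) (a0 : Int),
    (∀ z ∈ a, z ≤ a0) → (∀ z ∈ b, z ≤ a0) →
    dualG (a ++ [a0]) b = dualG a b := by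
  intro b
  induction b with
  | nil => intro a a0 _ _; rw [dualG_nil_right, dualG_nil_right]
  | cons c cs ih =>
      intro a a0 ha hb
      cases a with
      | nil =>
          have hc : ¬ (a0 < c) := not_lt.mpr (hb c (by simp))
          have := ih [] a0 (by simp) (fun z hz => hb z (by simp [hz]))
          simp only [List.nil_append, dualG, if_neg hc, dualG_nil_left] at this ⊢
          exact this
      | cons x xs =>
          by_cases hc : x < c
          · have := ih xs a0 (fun z hz => ha z (by simp [hz]))
              (fun z hz => hb z (by simp [hz]))
            simp only [List.cons_append, dualG, if_pos hc]
            rw [this]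
          · have := ih (x :: xs) a0 ha (fun z hz => hb z (by simp [hz]))
            simp only [List.cons_append, dualG, if_neg hc] at this ⊢
            exact this

-- ---- A's greedy (descending) equals B's greedy (ascending) --------------------

lemma mergeRun_eq_dualG : ∀ (a b : List Int) (ans v : Int),
    a.Pairwise (fun x y => y ≤ x) → b.Pairwise (fun x y => y ≤ x) →
    mergeRun a b ans = some v → v = ans + dualG a.reverse b.reverse := by
  intro a
  induction a with
  | nil =>
      intro b ans v _ _ h
      cases b <;> simp only [mergeRun, Option.some.injEq] at h <;>
        simp [← h, List.reverse_nil, dualG_nil_left]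
  | cons a0 as ih =>
      intro b ans v hA hB h
      cases b with
      | nil => exact absurd h (by simp [mergeRun])
      | cons b0 bs =>
          obtain ⟨hA0, hAs⟩ := List.pairwise_cons.mp hA
          obtain ⟨hB0, hBs⟩ := List.pairwise_cons.mp hB
          by_cases hw : b0 > a0
          · simp only [mergeRun, if_pos hw] at h
            have hv := ih bs (ans + 1) v hAs hBs h
            rw [List.reverse_cons, List.reverse_cons,
                dualG_snoc_win bs.reverse as.reverse a0 b0
                  (fun z hz => hA0 z (List.mem_reverse.mp hz))
                  (fun z hz => hB0 z (List.mem_reverse.mp hz)) hw]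
            omega
          · simp only [mergeRun, if_neg hw] at h
            have hv := ih (b0 :: bs) ans v hAs hB h
            rw [List.reverse_cons,
                dualG_snoc_skip (b0 :: bs).reverse as.reverse a0
                  (fun z hz => hA0 z (List.mem_reverse.mp hz))
                  (fun z hz => by
                    rcases List.mem_cons.mp (List.mem_reverse.mp hz) with hz' | hz'
                    · subst hz'; omega
                    · exact le_trans (hB0 z hz') (by omega))]
            exact hv

-- the ascending sort is the reverse of the descending sort (Int values, identity key)
lemma sorted_false_eq_rev_true (L : List Int) :
    PySem.List.sorted L (fun x => x) false
      = (PySem.List.sorted L (fun x => x) true).reverse := by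
  apply PySem.List.sorted_id_eq_of_perm_of_pairwise
  · exact ((PySem.List.sorted L (fun x => x) true).reverse_perm).trans
      (PySem.List.sorted_perm L (fun x => x) true)
  · exact (List.pairwise_reverse).mpr (PySem.List.sorted_pairwise_rev L (fun x => x))

-- ---- A never exhausts heap b under Pre_ ----------------------------------------

-- if the heap b empties mid-loop, every B card beat a distinct A card above A's minimum
lemma mergeRun_none_char : ∀ (a b : List Int) (ans : Int),
    a.Pairwise (fun x y => y ≤ x) → mergeRun a b ans = none →
    b.length < a.length ∧
      ∀ p ∈ List.zip b (a.drop (a.length - b.length - 1)), p.2 < p.1 := by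
  intro a
  induction a with
  | nil => intro b ans _ h; cases b <;> simp [mergeRun] at h
  | cons a0 as ih =>
      intro b ans hA h
      obtain ⟨hA0, hAs⟩ := List.pairwise_cons.mp hA
      cases b with
      | nil => exact ⟨by simp, by simp⟩
      | cons b0 bs =>
          by_cases hw : b0 > a0
          · simp only [mergeRun, if_pos hw] at h
            obtain ⟨hlen, hall⟩ := ih bs (ans + 1) hAs h
            refine ⟨by simp only [List.length_cons]; omega, ?_⟩
            have hidx : (a0 :: as).length - (b0 :: bs).length - 1
                = as.length - bs.length - 1 := by simp only [List.length_cons]; omega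
            rw [hidx]
            rcases Nat.eq_zero_or_pos (as.length - bs.length - 1) with hd | hd
            · rw [hd, List.drop_zero, List.zip_cons_cons]
              intro p hp
              rcases List.mem_cons.mp hp with hp' | hp'
              · subst hp'; exact hw
              · have hm : p ∈ List.zip bs (as.drop (as.length - bs.length - 1)) := by
                  rw [hd, List.drop_zero]; exact hp'
                exact hall p hm
            · -- d ≥ 1: (a0::as).drop d = as.drop (d-1) = as[d-1] :: as.drop d
              obtain ⟨d', hd'⟩ : ∃ d', as.length - bs.length - 1 = d' + 1 :=
                ⟨as.length - bs.length - 2, by omega⟩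
              have hd'lt : d' < as.length := by omega
              have hstep : (a0 :: as).drop (d' + 1) = as.drop d' := by
                simp [List.drop_succ_cons]
              have hcons : as.drop d' = as[d'] :: as.drop (d' + 1) :=
                (List.getElem_cons_drop hd'lt).symm
              rw [hd', hstep, hcons, List.zip_cons_cons]
              intro p hp
              rcases List.mem_cons.mp hp with hp' | hp'
              · subst hp'
                exact lt_of_le_of_lt (hA0 _ (List.getElem_mem hd'lt)) hw
              · rw [← hd'] at hp'
                exact hall p hp'
          · simp only [mergeRun, if_neg hw] at h
            obtain ⟨hlen, hall⟩ := ih (b0 :: bs) ans hAs h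
            refine ⟨by simp only [List.length_cons] at hlen ⊢; omega, ?_⟩
            simp only [List.length_cons] at hlen hall ⊢
            have hidx : as.length + 1 - (bs.length + 1) - 1
                = as.length - (bs.length + 1) - 1 + 1 := by omega
            rw [hidx, List.drop_succ_cons]
            exact hall

lemma pre_some (A B : List Int) (hp : Pre_solution A B) :
    mergeRun (PySem.List.sorted A (fun x => x) true)
             (PySem.List.sorted B (fun x => x) true) 0 ≠ none := by
  intro hnone
  obtain ⟨hlen, hall⟩ := mergeRun_none_char _ _ _
    (PySem.List.sorted_pairwise_rev A (fun x => x)) hnone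
  have hnA : (PySem.List.sorted A (fun x => x) true).length = A.length :=
    (PySem.List.sorted_perm A (fun x => x) true).length_eq
  have hnB : (PySem.List.sorted B (fun x => x) true).length = B.length :=
    (PySem.List.sorted_perm B (fun x => x) true).length_eq
  rcases hp with hA | hle | hany
  · have h0 : A.length = 0 := by rw [hA]; rfl
    omega
  · rw [hnA, hnB] at hlen; omega
  · obtain ⟨p, hpmem, hple⟩ := List.any_eq_true.mp hany
    have hple' : p.1 ≤ p.2 := by simpa using hple
    obtain ⟨k, hk, hpk⟩ := List.mem_iff_getElem.mp hpmem
    have hlA : (PySem.List.sorted A (fun x => x) false).length = A.length :=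
      (PySem.List.sorted_perm A (fun x => x) false).length_eq
    have hlB : (PySem.List.sorted B (fun x => x) false).length = B.length :=
      (PySem.List.sorted_perm B (fun x => x) false).length_eq
    simp only [List.length_zip, List.length_drop, hlA, hlB] at hk
    rw [List.getElem_zip] at hpk
    rw [← hpk] at hple'
    simp only [List.getElem_drop] at hple'
    -- rewrite the ascending sorts as reverses of the descending ones
    simp only [sorted_false_eq_rev_true, List.getElem_reverse] at hple'
    simp only [hnA, hnB] at hple'
    rw [hnA, hnB] at hlen
    have hkB : k < B.length := by omega
    -- the matching pair inspected by mergeRun_none_char, at index |B| - 1 - k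
    have hzlen : B.length - 1 - k
        < (List.zip (PySem.List.sorted B (fun x => x) true)
            ((PySem.List.sorted A (fun x => x) true).drop
              ((PySem.List.sorted A (fun x => x) true).length
                - (PySem.List.sorted B (fun x => x) true).length - 1))).length := by
      simp only [List.length_zip, List.length_drop, hnA, hnB]; omega
    have hval := hall _ (List.getElem_mem hzlen)
    rw [List.getElem_zip] at hval
    simp only [List.getElem_drop, hnA, hnB] at hval
    -- identify the two A-indices and the two B-indices
    have hia : A.length - B.length - 1 + (B.length - 1 - k)
        = A.length - 1 - (1 + k) := by omega
    simp only [hia] at hval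
    exact absurd (lt_of_le_of_lt hple' hval) (lt_irrefl _)

-- ===== VERDICT (by name: the statement is the Claim_ definition above) =====
theorem solution_spec : Claim_equal_solution := by
  intro A B _ hp
  unfold Spec_solution
  rw [solution_eq_mergeRun, solution_alt_eq_dualG,
      sorted_false_eq_rev_true, sorted_false_eq_rev_true]
  cases h : mergeRun (PySem.List.sorted A (fun x => x) true)
      (PySem.List.sorted B (fun x => x) true) 0 with
  | none => exact absurd h (pre_some A B hp)
  | some v =>
      have hv := mergeRun_eq_dualG _ _ 0 v
        (PySem.List.sorted_pairwise_rev A (fun x => x))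
        (PySem.List.sorted_pairwise_rev B (fun x => x)) h
      simpa using hv
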